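-- pv_equiv track=rewrite | github.com/justyns/tsugite | tsugite/cli/helpers.py | _parse_agent_refs
-- ===== SOURCE A (Python) =====
-- from typing import TYPE_CHECKING, Any, Generator, List, Optional, Tuple
--
-- def _parse_agent_refs(args: List[str]) -> tuple[List[str], List[str]]:
--     """Parse agent references from arguments.
--
--     Args:
--         args: List of positional arguments from CLI
--
--     Returns:
--         Tuple of (agent_refs, remaining_prompt_parts)
--     """
--     agents = []
--     prompt_parts = []
--
--     for arg in args:
--         has_file_reference = "@" in arg
--         has_path_separator = "/" in arg
--         has_spaces = " " in arg
--
--         is_agent = (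
--             arg.startswith("+") or (arg.endswith(".md") and not has_spaces) or (has_path_separator and not has_spaces)
--         ) and not has_file_reference
--
--         if is_agent and not prompt_parts:
--             agents.append(arg)
--         else:
--             prompt_parts.append(arg)
--
--     return agents, prompt_parts
-- ===== SOURCE B (Python) =====
-- def _is_agent(arg):
--     return (
--         arg.startswith("+")
--         or (arg.endswith(".md") and " " not in arg)
--         or ("/" in arg and " " not in arg)
--     ) and "@" not in arg
--
--
-- def _parse_agent_refs(args):
--     i = next((j for j, a in enumerate(args) if not _is_agent(a)), len(args))
--     return args[:i], args[i:]
-- ===== Notes on version B (the rewrite author's own statement) =====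
-- stated objective: simpler
-- what changed: Replaces the stateful accumulate-into-two-lists loop with a pure predicate helper plus find-the-first-non-agent-index and two slices (the agents are exactly the leading run of agent-like args).
import Mathlib
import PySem

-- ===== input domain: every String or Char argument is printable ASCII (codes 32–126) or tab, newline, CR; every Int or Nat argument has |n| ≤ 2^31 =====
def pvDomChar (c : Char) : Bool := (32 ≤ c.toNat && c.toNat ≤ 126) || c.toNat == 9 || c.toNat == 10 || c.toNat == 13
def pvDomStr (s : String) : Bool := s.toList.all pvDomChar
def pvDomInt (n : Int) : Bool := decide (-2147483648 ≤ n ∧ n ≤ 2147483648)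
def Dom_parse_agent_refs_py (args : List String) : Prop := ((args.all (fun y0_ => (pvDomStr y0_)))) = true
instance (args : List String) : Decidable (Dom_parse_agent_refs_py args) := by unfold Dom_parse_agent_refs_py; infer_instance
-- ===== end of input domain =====

-- B replaces A's stateful two-accumulator loop by a pure predicate helper,
-- a first-non-agent index search and two slices (objective: simpler).


-- ===== PORT A =====
-- the for-loop of A as structural recursion over args, carrying (agents, prompt_parts)
def parseLoopA : List String → List String → List String → List String × List String
  | [], agents, prompt_parts => (agents, prompt_parts)
  | arg :: rest, agents, prompt_parts =>
    let has_file_reference := PySem.Str.isIn "@" arg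
    let has_path_separator := PySem.Str.isIn "/" arg
    let has_spaces := PySem.Str.isIn " " arg
    let is_agent :=
      (PySem.Str.startswith arg "+"
        || (PySem.Str.endswith arg ".md" && !has_spaces)
        || (has_path_separator && !has_spaces)) && !has_file_reference
    if is_agent && prompt_parts.isEmpty then
      parseLoopA rest (agents ++ [arg]) prompt_parts
    else
      parseLoopA rest agents (prompt_parts ++ [arg])

def parse_agent_refs_py (args : List String) : List String × List String :=
  parseLoopA args [] []

-- ===== PORT B =====
-- _is_agent(arg) from Source B
def isAgentB (arg : String) : Bool :=
  (PySem.Str.startswith arg "+"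
    || (PySem.Str.endswith arg ".md" && !PySem.Str.isIn " " arg)
    || (PySem.Str.isIn "/" arg && !PySem.Str.isIn " " arg)) && !PySem.Str.isIn "@" arg

-- i = next((j for j, a in enumerate(args) if not _is_agent(a)), len(args))
def splitIdxB : List String → Nat
  | [] => 0
  | a :: rest => if !isAgentB a then 0 else splitIdxB rest + 1

def parse_agent_refs_py_alt (args : List String) : List String × List String :=
  let i : Int := (splitIdxB args : Nat)
  (PySem.List.slice args none (some i), PySem.List.slice args (some i) none)

-- ===== PRECONDITION & SPEC =====
def Spec_parse_agent_refs_py (args : List String) (out : List String × List String) : Prop := out = parse_agent_refs_py_alt args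
instance (args : List String) (out : List String × List String) : Decidable (Spec_parse_agent_refs_py args out) := by unfold Spec_parse_agent_refs_py; infer_instance

-- ===== CLAIM (what is proved, stated in full; the proofs are below) =====
def Claim_equal_parse_agent_refs_py : Prop := ∀ (args : List String), Dom_parse_agent_refs_py args → Spec_parse_agent_refs_py args (parse_agent_refs_py args)

-- ===== LEMMAS AND PROOFS =====
-- once prompt_parts is non-empty, A's loop only appends to it
theorem parseLoopA_nonempty (args : List String) : ∀ (agents prompt : List String),
    prompt ≠ [] → parseLoopA args agents prompt = (agents, prompt ++ args) := by
  induction args with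
  | nil => intro agents prompt _; simp [parseLoopA]
  | cons arg rest ih =>
    intro agents prompt hp
    have hne : prompt.isEmpty = false := by
      cases prompt with
      | nil => exact absurd rfl hp
      | cons _ _ => rfl
    simp only [parseLoopA, hne, Bool.and_false]
    rw [ih agents (prompt ++ [arg]) (by simp)]
    simp

-- while prompt_parts is empty, A's loop realises the take/drop at the split index
theorem parseLoopA_empty (args : List String) : ∀ (agents : List String),
    parseLoopA args agents [] =
      (agents ++ args.take (splitIdxB args), args.drop (splitIdxB args)) := by
  induction args with
  | nil => intro agents; simp [parseLoopA, splitIdxB]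
  | cons arg rest ih =>
    intro agents
    simp only [parseLoopA, List.isEmpty_nil, Bool.and_true]
    by_cases h : isAgentB arg
    · rw [if_pos (by simpa [isAgentB] using h)]
      rw [ih (agents ++ [arg])]
      simp [splitIdxB, h]
    · rw [if_neg (by simpa [isAgentB] using h)]
      rw [show ([]:List String) ++ [arg] = [arg] from rfl, parseLoopA_nonempty rest agents [arg] (by simp)]
      simp [splitIdxB, h]

-- ===== VERDICT (by name: the statement is the Claim_ definition above) =====
theorem parse_agent_refs_py_spec : Claim_equal_parse_agent_refs_py := by
  intro args _
  unfold Spec_parse_agent_refs_py parse_agent_refs_py parse_agent_refs_py_alt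
  rw [parseLoopA_empty args []]
  simp [PySem.List.slice_to_natCast, PySem.List.slice_from_natCast]
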